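-- pv_equiv track=rewrite | github.com/frames202/pogoda | hw/chek_way.py | check_way
-- ===== SOURCE A (Python) =====
-- def check_way(way):
--     horizon = 0
--     vertical = 0
--     if len(way) != 10:
--         return False
--     for i in way:
--         if i == 'w':
--             horizon -= 1
--         elif i == 's':
--             vertical -= 1
--         elif i == 'e':
--             horizon += 1
--         elif i == 'n':
--             vertical += 1
--     if horizon == 0 and vertical == 0:
--         return True
--     else:
--         return False
-- ===== SOURCE B (Python) =====
-- def check_way(way):
--     if len(way) != 10:
--         return False
--     moves = list(way)
--     for a, b in (('w', 'e'), ('s', 'n')):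
--         while a in moves:
--             if b not in moves:
--                 return False
--             moves.remove(a)
--             moves.remove(b)
--         if b in moves:
--             return False
--     return True
-- ===== Notes on version B (the rewrite author's own statement) =====
-- stated objective: alternative
-- what changed: Replaces A's single accumulating pass over (horizon, vertical) coordinates with destructive pair-cancellation: repeatedly remove one 'w' together with one 'e', then one 's' together with one 'n', succeeding iff every move finds a partner and no opposing move is left over.
import Mathlib
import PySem

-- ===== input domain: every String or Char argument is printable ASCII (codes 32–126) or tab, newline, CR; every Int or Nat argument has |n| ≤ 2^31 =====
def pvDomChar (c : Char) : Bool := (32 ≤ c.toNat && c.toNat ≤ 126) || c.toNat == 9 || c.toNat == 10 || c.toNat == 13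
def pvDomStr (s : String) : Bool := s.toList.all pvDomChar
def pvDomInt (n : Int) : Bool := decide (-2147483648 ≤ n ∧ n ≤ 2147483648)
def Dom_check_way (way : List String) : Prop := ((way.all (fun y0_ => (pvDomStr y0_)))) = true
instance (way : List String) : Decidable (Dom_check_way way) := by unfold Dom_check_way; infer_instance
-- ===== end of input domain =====

-- B replaces A's single accumulating coordinate pass by destructive pair-cancellation
-- (repeatedly remove one 'w' with one 'e', then one 's' with one 'n'); objective: alternative.

-- ===== PORT A =====
-- literal transliteration of A: length guard, then one foldl pass over (horizon, vertical)
def check_way (way : List String) : Bool :=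
  if way.length ≠ 10 then false
  else
    let st := way.foldl (fun (st : Int × Int) i =>
      if i = "w" then (st.1 - 1, st.2)
      else if i = "s" then (st.1, st.2 - 1)
      else if i = "e" then (st.1 + 1, st.2)
      else if i = "n" then (st.1, st.2 + 1)
      else st) (0, 0)
    if st.1 = 0 ∧ st.2 = 0 then true else false

-- ===== PORT B =====
-- B's while loop: while a ∈ moves, require b ∈ moves and remove the first occurrence of each
-- (Python list.remove = List.erase here since both remove the first match and membership is checked);
-- none models the 'return False' exits, some m the surviving moves list.
def cancelLoop (a b : String) (moves : List String) : Option (List String) :=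
  if ha : a ∈ moves then
    if b ∈ moves then cancelLoop a b ((moves.erase a).erase b)
    else none
  else if b ∈ moves then none else some moves
termination_by moves.length
decreasing_by
  have h1 : (moves.erase a).length = moves.length - 1 := List.length_erase_of_mem ha
  have h2 : ((moves.erase a).erase b).length ≤ (moves.erase a).length := List.length_erase_le ..
  have h3 : 0 < moves.length := List.length_pos_of_mem ha
  omega

-- B: length guard, then cancel the ('w','e') pairs, then the ('s','n') pairs on what is left
def check_way_alt (way : List String) : Bool :=
  if way.length ≠ 10 then false
  else
    match cancelLoop "w" "e" way with
    | none => false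
    | some m =>
      match cancelLoop "s" "n" m with
      | none => false
      | some _ => true

-- ===== PRECONDITION & SPEC =====
def Spec_check_way (way : List String) (out : Bool) : Prop := out = check_way_alt way
instance (way : List String) (out : Bool) : Decidable (Spec_check_way way out) := by unfold Spec_check_way; infer_instance

-- ===== CLAIM (what is proved, stated in full; the proofs are below) =====
def Claim_equal_check_way : Prop := ∀ (way : List String), Dom_check_way way → Spec_check_way way (check_way way)

-- ===== LEMMAS AND PROOFS =====
-- the fold's state is the start state shifted by the direction-count differences
theorem check_way_fold_counts (way : List String) (h v : Int) :
    way.foldl (fun (st : Int × Int) i =>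
      if i = "w" then (st.1 - 1, st.2)
      else if i = "s" then (st.1, st.2 - 1)
      else if i = "e" then (st.1 + 1, st.2)
      else if i = "n" then (st.1, st.2 + 1)
      else st) (h, v)
    = (h + way.count "e" - way.count "w", v + way.count "n" - way.count "s") := by
  induction way generalizing h v with
  | nil => simp
  | cons x xs ih =>
    simp only [List.foldl_cons, List.count_cons]
    by_cases hw : x = "w" <;> by_cases hs : x = "s" <;> by_cases he : x = "e" <;>
      by_cases hn : x = "n" <;>
      simp_all [Prod.ext_iff] <;> omega

-- cancellation succeeds exactly when the two directions occur equally often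
theorem cancelLoop_isSome (a b : String) (hab : a ≠ b) (moves : List String) :
    (cancelLoop a b moves).isSome = (moves.count a == moves.count b) := by
  induction moves using cancelLoop.induct a b with
  | case1 moves ha hb ih =>
    rw [cancelLoop, dif_pos ha, if_pos hb, ih]
    have hca : 0 < moves.count a := List.count_pos_iff.mpr ha
    have hcb : 0 < moves.count b := List.count_pos_iff.mpr hb
    have e1 : ((moves.erase a).erase b).count a = moves.count a - 1 := by
      rw [List.count_erase_of_ne hab, List.count_erase_self]
    have e2 : ((moves.erase a).erase b).count b = moves.count b - 1 := by
      rw [List.count_erase_self, List.count_erase_of_ne hab.symm]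
    rw [e1, e2]
    rcases eq_or_ne (moves.count a) (moves.count b) with h | h
    · simp [h]
    · have h' : moves.count a - 1 ≠ moves.count b - 1 := by omega
      simp [h, h']
  | case2 moves ha hb =>
    rw [cancelLoop, dif_pos ha, if_neg hb]
    have hca : 0 < moves.count a := List.count_pos_iff.mpr ha
    have hcb : moves.count b = 0 := List.count_eq_zero.mpr hb
    simp [hcb, hca.ne']
  | case3 moves ha hb =>
    rw [cancelLoop, dif_neg ha, if_pos hb]
    have hca : moves.count a = 0 := List.count_eq_zero.mpr ha
    have hcb : 0 < moves.count b := List.count_pos_iff.mpr hb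
    simp [hca]
    omega
  | case4 moves ha hb =>
    rw [cancelLoop, dif_neg ha, if_neg hb]
    have hca : moves.count a = 0 := List.count_eq_zero.mpr ha
    have hcb : moves.count b = 0 := List.count_eq_zero.mpr hb
    simp [hca, hcb]

-- cancellation never touches the count of any other direction
theorem cancelLoop_count (a b c : String) (hca : c ≠ a) (hcb : c ≠ b) (moves : List String) :
    ∀ m, cancelLoop a b moves = some m → m.count c = moves.count c := by
  induction moves using cancelLoop.induct a b with
  | case1 moves ha hb ih =>
    intro m hm
    rw [cancelLoop, dif_pos ha, if_pos hb] at hm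
    rw [ih m hm, List.count_erase_of_ne hcb, List.count_erase_of_ne hca]
  | case2 moves ha hb =>
    intro m hm; rw [cancelLoop, dif_pos ha, if_neg hb] at hm; exact absurd hm (by simp)
  | case3 moves ha hb =>
    intro m hm; rw [cancelLoop, dif_neg ha, if_pos hb] at hm; exact absurd hm (by simp)
  | case4 moves ha hb =>
    intro m hm
    rw [cancelLoop, dif_neg ha, if_neg hb] at hm
    cases hm; rfl

-- ===== VERDICT (by name: the statement is the Claim_ definition above) =====
theorem check_way_spec : Claim_equal_check_way := by
  intro way _
  unfold Spec_check_way check_way check_way_alt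
  by_cases hl : way.length ≠ 10
  · simp [hl]
  · simp only [hl, if_false]
    rw [check_way_fold_counts]
    simp only [zero_add]
    by_cases h1 : way.count "w" = way.count "e"
    · have hs1 : (cancelLoop "w" "e" way).isSome = true := by
        rw [cancelLoop_isSome "w" "e" (by decide) way]; simp [h1]
      obtain ⟨m, hm⟩ := Option.isSome_iff_exists.mp hs1
      simp only [hm]
      have hms : m.count "s" = way.count "s" :=
        cancelLoop_count "w" "e" "s" (by decide) (by decide) way m hm
      have hmn : m.count "n" = way.count "n" :=
        cancelLoop_count "w" "e" "n" (by decide) (by decide) way m hm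
      by_cases h2 : way.count "s" = way.count "n"
      · have hs2 : (cancelLoop "s" "n" m).isSome = true := by
          rw [cancelLoop_isSome "s" "n" (by decide) m, hms, hmn]; simp [h2]
        obtain ⟨m2, hm2⟩ := Option.isSome_iff_exists.mp hs2
        simp only [hm2]
        split_ifs with hc
        · rfl
        · exact absurd ⟨by omega, by omega⟩ hc
      · have hs2 : (cancelLoop "s" "n" m) = none := by
          have := cancelLoop_isSome "s" "n" (by decide) m
          rw [hms, hmn] at this
          cases hcl : cancelLoop "s" "n" m with
          | none => rfl
          | some _ => rw [hcl] at this; simp at this; exact absurd this h2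
        simp only [hs2]
        split_ifs with hc
        · exfalso; omega
        · rfl
    · have hs1 : (cancelLoop "w" "e" way) = none := by
        have := cancelLoop_isSome "w" "e" (by decide) way
        cases hcl : cancelLoop "w" "e" way with
        | none => rfl
        | some _ => rw [hcl] at this; simp at this; exact absurd this h1
      simp only [hs1]
      split_ifs with hc
      · exfalso; omega
      · rfl
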